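-- pv_equiv track=rewrite | github.com/krushna2507/Image-Video-Compression-Enhancement | video_processing.py | simulate_mpeg_labels
-- ===== SOURCE A (Python) =====
-- def simulate_mpeg_labels(frame_count):
--     labels = {}
--     for i in range(frame_count):
--         if i % 10 == 0:
--             labels[i] = "I-frame"
--         elif i % 5 == 0:
--             labels[i] = "P-frame"
--         else:
--             labels[i] = "B-frame"
--     return labels
-- ===== SOURCE B (Python) =====
-- def simulate_mpeg_labels(frame_count):
--     labels = {i: "B-frame" for i in range(frame_count)}
--     for i in range(0, frame_count, 5):
--         labels[i] = "P-frame"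
--     for i in range(0, frame_count, 10):
--         labels[i] = "I-frame"
--     return labels
-- ===== Notes on version B (the rewrite author's own statement) =====
-- stated objective: alternative
-- what changed: Replaces the per-frame if/elif residue branching with staged passes: initialise every frame to B-frame, then overwrite the stride-5 frames with P-frame and the stride-10 frames with I-frame using strided ranges, so no per-frame test is performed at all.
import Mathlib
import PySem

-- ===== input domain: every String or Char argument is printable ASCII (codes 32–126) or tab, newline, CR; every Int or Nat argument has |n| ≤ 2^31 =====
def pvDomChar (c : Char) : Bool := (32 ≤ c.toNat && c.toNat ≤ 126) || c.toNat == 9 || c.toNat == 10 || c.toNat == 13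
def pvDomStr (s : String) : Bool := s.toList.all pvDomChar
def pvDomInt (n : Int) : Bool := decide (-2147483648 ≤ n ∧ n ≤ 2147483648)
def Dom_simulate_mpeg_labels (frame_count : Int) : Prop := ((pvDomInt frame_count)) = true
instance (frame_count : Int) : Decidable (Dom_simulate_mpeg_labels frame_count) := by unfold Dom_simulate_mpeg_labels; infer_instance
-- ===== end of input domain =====

-- B replaces A's per-frame if/elif residue test by staged passes: every frame is first
-- labelled B-frame, then the stride-5 frames are overwritten with P-frame and the
-- stride-10 frames with I-frame (alternative decomposition; same cost).

-- ===== PORT A =====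
-- labels = {}; for i in range(frame_count): if i % 10 == 0 … ; return labels
def simulate_mpeg_labels (frame_count : Int) : List (Int × String) :=
  ((PySem.List.pyRange 0 frame_count 1).foldl
    (fun (d : PySem.Dict Int String) i =>
      if PySem.Int.mod i 10 = 0 then d.insert i "I-frame"
      else if PySem.Int.mod i 5 = 0 then d.insert i "P-frame"
      else d.insert i "B-frame")
    PySem.Dict.empty).items

-- ===== PORT B =====
-- labels = {i: "B-frame" for i in range(frame_count)}
-- for i in range(0, frame_count, 5): labels[i] = "P-frame"
-- for i in range(0, frame_count, 10): labels[i] = "I-frame"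
def simulate_mpeg_labels_alt (frame_count : Int) : List (Int × String) :=
  ((PySem.List.pyRange 0 frame_count 10).foldl
    (fun (d : PySem.Dict Int String) i => d.insert i "I-frame")
    ((PySem.List.pyRange 0 frame_count 5).foldl
      (fun (d : PySem.Dict Int String) i => d.insert i "P-frame")
      ((PySem.List.pyRange 0 frame_count 1).foldl
        (fun (d : PySem.Dict Int String) i => d.insert i "B-frame")
        PySem.Dict.empty))).items

-- ===== PRECONDITION & SPEC =====
def Spec_simulate_mpeg_labels (frame_count : Int) (out : List (Int × String)) : Prop := out = simulate_mpeg_labels_alt frame_count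
instance (frame_count : Int) (out : List (Int × String)) : Decidable (Spec_simulate_mpeg_labels frame_count out) := by unfold Spec_simulate_mpeg_labels; infer_instance

-- ===== CLAIM (what is proved, stated in full; the proofs are below) =====
def Claim_equal_simulate_mpeg_labels : Prop := ∀ (frame_count : Int), Dom_simulate_mpeg_labels frame_count → Spec_simulate_mpeg_labels frame_count (simulate_mpeg_labels frame_count)

-- ===== LEMMAS AND PROOFS =====

-- A's loop body is a single insert of the branched label.
lemma body_eq :
    (fun (d : PySem.Dict Int String) i =>
      if PySem.Int.mod i 10 = 0 then d.insert i "I-frame"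
      else if PySem.Int.mod i 5 = 0 then d.insert i "P-frame"
      else d.insert i "B-frame")
    = fun (d : PySem.Dict Int String) i =>
        d.insert i (if PySem.Int.mod i 10 = 0 then "I-frame"
          else if PySem.Int.mod i 5 = 0 then "P-frame" else "B-frame") := by
  funext d i; split_ifs <;> rfl

-- An overwrite pass whose keys are all already present rewrites the items in place.
lemma items_foldl_overwrite (l : List Int) (v : String) (d : PySem.Dict Int String)
    (h : ∀ i ∈ l, d.contains i = true) :
    (l.foldl (fun d i => d.insert i v) d).items
      = d.items.map (fun p => if p.1 ∈ l then (p.1, v) else p) := by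
  induction l generalizing d with
  | nil => simp
  | cons a t ih =>
    simp only [List.foldl_cons]
    rw [ih _ (fun i hi => by
        rw [PySem.Dict.contains_insert]
        simp only [h i (List.mem_cons_of_mem _ hi), Bool.or_true]),
      PySem.Dict.items_insert_of_contains _ _ (h a List.mem_cons_self),
      List.map_map]
    apply List.map_congr_left
    intro p _
    by_cases h1 : p.1 = a <;> by_cases h2 : p.1 ∈ t <;>
      simp [Function.comp, h1, h2]

-- A positive-stride range is contained in the unit-stride range.
lemma hsub (n s : Int) (hs : 0 < s) :
    ∀ i ∈ PySem.List.pyRange 0 n s, i ∈ PySem.List.pyRange 0 n 1 := by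
  intro i hi
  obtain ⟨h1, h2, _⟩ := (PySem.List.mem_pyRange_iff_of_pos hs i).mp hi
  exact (PySem.List.mem_pyRange_one).mpr ⟨h1, h2⟩

-- Items after the base B-frame pass.
lemma hd0 (n : Int) :
    ((PySem.List.pyRange 0 n 1).foldl
      (fun (d : PySem.Dict Int String) i => d.insert i "B-frame") PySem.Dict.empty).items
    = (PySem.List.pyRange 0 n 1).map (fun i => (i, "B-frame")) := by
  rw [PySem.Dict.items_foldl_insert_fresh _ (fun (i : Int) => i) _ _
    (fun a _ => PySem.Dict.contains_empty a)
    (by simpa using PySem.List.nodup_pyRange_one 0 n)]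
  exact List.nil_append _

-- Items after the P-frame overwrite pass.
lemma hd1 (n : Int) :
    ((PySem.List.pyRange 0 n 5).foldl
      (fun (d : PySem.Dict Int String) i => d.insert i "P-frame")
      ((PySem.List.pyRange 0 n 1).foldl
        (fun (d : PySem.Dict Int String) i => d.insert i "B-frame") PySem.Dict.empty)).items
    = (PySem.List.pyRange 0 n 1).map
        (fun i => if i ∈ PySem.List.pyRange 0 n 5 then (i, "P-frame") else (i, "B-frame")) := by
  rw [items_foldl_overwrite _ _ _ (fun i hi => by
      rw [PySem.Dict.contains_iff_mem_keys]
      simp only [PySem.Dict.keys, hd0 n, List.map_map]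
      simpa using hsub n 5 (by decide) i hi),
    hd0 n, List.map_map]
  apply List.map_congr_left
  intro i _
  by_cases h : i ∈ PySem.List.pyRange 0 n 5 <;> simp [h]

-- Keys are unchanged by the P-frame pass: every key of the intermediate dict.
lemma hk1 (n : Int) :
    ((PySem.List.pyRange 0 n 5).foldl
      (fun (d : PySem.Dict Int String) i => d.insert i "P-frame")
      ((PySem.List.pyRange 0 n 1).foldl
        (fun (d : PySem.Dict Int String) i => d.insert i "B-frame") PySem.Dict.empty)).keys
    = PySem.List.pyRange 0 n 1 := by
  simp only [PySem.Dict.keys, hd1 n, List.map_map]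
  have he : ((fun p : Int × String => p.1) ∘ fun i : Int =>
      if i ∈ PySem.List.pyRange 0 n 5 then (i, "P-frame") else (i, "B-frame")) = fun i => i := by
    funext j
    by_cases h : j ∈ PySem.List.pyRange 0 n 5 <;> simp [h]
  rw [he, List.map_id']

-- Items after the I-frame overwrite pass.
lemma hd2 (n : Int) :
    ((PySem.List.pyRange 0 n 10).foldl
      (fun (d : PySem.Dict Int String) i => d.insert i "I-frame")
      ((PySem.List.pyRange 0 n 5).foldl
        (fun (d : PySem.Dict Int String) i => d.insert i "P-frame")
        ((PySem.List.pyRange 0 n 1).foldl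
          (fun (d : PySem.Dict Int String) i => d.insert i "B-frame") PySem.Dict.empty))).items
    = (PySem.List.pyRange 0 n 1).map
        (fun i => if i ∈ PySem.List.pyRange 0 n 10 then (i, "I-frame")
          else if i ∈ PySem.List.pyRange 0 n 5 then (i, "P-frame") else (i, "B-frame")) := by
  rw [items_foldl_overwrite _ _ _ (fun i hi => by
      rw [PySem.Dict.contains_iff_mem_keys, hk1 n]
      exact hsub n 10 (by decide) i hi),
    hd1 n, List.map_map]
  apply List.map_congr_left
  intro i _
  by_cases h10 : i ∈ PySem.List.pyRange 0 n 10 <;>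
    by_cases h5 : i ∈ PySem.List.pyRange 0 n 5 <;> simp [h10, h5]

-- ===== VERDICT (by name: the statement is the Claim_ definition above) =====
theorem simulate_mpeg_labels_spec : Claim_equal_simulate_mpeg_labels := by
  intro n _
  unfold Spec_simulate_mpeg_labels simulate_mpeg_labels simulate_mpeg_labels_alt
  rw [body_eq,
    PySem.Dict.items_foldl_insert_fresh _ (fun (i : Int) => i) _ _
      (fun a _ => PySem.Dict.contains_empty a)
      (by simpa using PySem.List.nodup_pyRange_one 0 n),
    hd2 n]
  refine (List.nil_append _).symm ▸ (List.map_congr_left ?_)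
  intro i hi
  obtain ⟨hi0, hin⟩ := PySem.List.mem_pyRange_one.mp hi
  by_cases h10 : (10 : Int) ∣ i
  · have h5 : (5 : Int) ∣ i := dvd_trans (by decide) h10
    have m10 : i ∈ PySem.List.pyRange 0 n 10 :=
      (PySem.List.mem_pyRange_iff_of_pos (by decide) i).mpr ⟨hi0, hin, by simpa using h10⟩
    rw [if_pos ((PySem.Int.mod_eq_zero_iff_dvd i 10).mpr h10), if_pos m10]
  · have m10 : i ∉ PySem.List.pyRange 0 n 10 := fun hm => by
      obtain ⟨_, _, hd⟩ := (PySem.List.mem_pyRange_iff_of_pos (by decide) i).mp hm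
      exact h10 (by simpa using hd)
    rw [if_neg (fun h => h10 ((PySem.Int.mod_eq_zero_iff_dvd i 10).mp h)), if_neg m10]
    by_cases h5 : (5 : Int) ∣ i
    · have m5 : i ∈ PySem.List.pyRange 0 n 5 :=
        (PySem.List.mem_pyRange_iff_of_pos (by decide) i).mpr ⟨hi0, hin, by simpa using h5⟩
      rw [if_pos ((PySem.Int.mod_eq_zero_iff_dvd i 5).mpr h5), if_pos m5]
    · have m5 : i ∉ PySem.List.pyRange 0 n 5 := fun hm => by
        obtain ⟨_, _, hd⟩ := (PySem.List.mem_pyRange_iff_of_pos (by decide) i).mp hm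
        exact h5 (by simpa using hd)
      rw [if_neg (fun h => h5 ((PySem.Int.mod_eq_zero_iff_dvd i 5).mp h)), if_neg m5]
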